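-- pv_equiv track=rewrite | github.com/frank-xh/aps-cpsat | src/aps_cp_sat/model/block_realizer.py | _summarize_second_receiver_failure
-- ===== SOURCE A (Python) =====
-- from typing import Dict, List, Optional, Any, Tuple
--
-- def _summarize_second_receiver_failure(candidates: List[Dict[str, Any]]) -> str:
--     if not candidates:
--         return "NO_LOCAL_DONOR"
--     reasons = [str(c.get("rejection_reason", "")) for c in candidates]
--     if reasons and all(r == "HEALTHY_CAMPAIGN_PROTECTED" for r in reasons):
--         return "ONLY_HEALTHY_DONORS_AVAILABLE"
--     non_healthy = [r for r in reasons if r != "HEALTHY_CAMPAIGN_PROTECTED"]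
--     if non_healthy and all(r == "PAIR_INVALID" for r in non_healthy):
--         return "ALL_DONORS_PAIR_INVALID"
--     if non_healthy and all(r == "DUPLICATE_ORDER" for r in non_healthy):
--         return "ALL_DONORS_DUPLICATE_RISK"
--     if non_healthy and all(r in {"NO_TON_GAIN", "NO_BAND_OR_GAP_PROGRESS"} for r in non_healthy):
--         return "ALL_DONORS_NO_TON_GAIN"
--     if non_healthy and all(r in {"DONOR_BAND_NOT_ALLOWED", "EMPTY_DONOR_ROWS"} for r in non_healthy):
--         return "SECOND_RECEIVER_NOT_WORTH_PROMOTING"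
--     return "NO_LOCAL_DONOR"
-- ===== SOURCE B (Python) =====
-- _CAT = {
--     "PAIR_INVALID": "ALL_DONORS_PAIR_INVALID",
--     "DUPLICATE_ORDER": "ALL_DONORS_DUPLICATE_RISK",
--     "NO_TON_GAIN": "ALL_DONORS_NO_TON_GAIN",
--     "NO_BAND_OR_GAP_PROGRESS": "ALL_DONORS_NO_TON_GAIN",
--     "DONOR_BAND_NOT_ALLOWED": "SECOND_RECEIVER_NOT_WORTH_PROMOTING",
--     "EMPTY_DONOR_ROWS": "SECOND_RECEIVER_NOT_WORTH_PROMOTING",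
-- }
--
-- def _summarize_second_receiver_failure(candidates):
--     if not candidates:
--         return "NO_LOCAL_DONOR"
--     verdict = None  # verdict implied by the non-healthy reasons seen so far
--     for c in candidates:
--         r = str(c.get("rejection_reason", ""))
--         if r == "HEALTHY_CAMPAIGN_PROTECTED":
--             continue
--         cat = _CAT.get(r, "NO_LOCAL_DONOR")
--         if verdict is None:
--             verdict = cat
--         elif verdict != cat:
--             verdict = "NO_LOCAL_DONOR"
--     return "ONLY_HEALTHY_DONORS_AVAILABLE" if verdict is None else verdict
-- ===== Notes on version B (the rewrite author's own statement) =====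
-- stated objective: alternative
-- what changed: B replaces A's staged whole-list scans (one all()-pass per verdict over the reasons list and a filtered copy) by a single fold over the candidates that classifies each non-healthy reason into its verdict category via a lookup table and meets the categories in an accumulator (None / agreed category / NO_LOCAL_DONOR); correct because the four reason sets are disjoint, so A's branches are mutually exclusive and the verdict is exactly the unique common category of the non-healthy reasons.
import Mathlib
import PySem

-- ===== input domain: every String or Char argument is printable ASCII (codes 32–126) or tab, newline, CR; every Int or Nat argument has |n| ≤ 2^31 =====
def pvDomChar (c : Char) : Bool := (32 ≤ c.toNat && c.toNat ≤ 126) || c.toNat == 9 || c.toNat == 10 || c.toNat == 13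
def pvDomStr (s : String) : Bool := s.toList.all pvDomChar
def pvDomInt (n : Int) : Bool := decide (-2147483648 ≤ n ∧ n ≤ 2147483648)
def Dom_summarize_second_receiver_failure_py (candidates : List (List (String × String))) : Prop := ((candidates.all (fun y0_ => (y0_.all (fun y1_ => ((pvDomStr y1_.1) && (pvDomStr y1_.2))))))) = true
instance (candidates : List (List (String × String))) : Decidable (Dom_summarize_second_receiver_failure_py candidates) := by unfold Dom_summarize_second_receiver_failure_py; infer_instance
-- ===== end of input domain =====

-- ===== PORT A =====
-- B replaces A's staged all()-scans by one fold that classifies each non-healthy reason into its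
-- verdict category and meets the categories in an accumulator (alternative single-pass algorithm).
-- dict values are strings here, so Python's str(...) is the identity; c.get(k, "") = PySem.Dict.getD c k "".
def summarize_second_receiver_failure_py (candidates : List (List (String × String))) : String :=
  if candidates.isEmpty then "NO_LOCAL_DONOR"
  else
    let reasons := candidates.map (fun c => PySem.Dict.getD (PySem.Dict.mk c) "rejection_reason" "")
    if !reasons.isEmpty && reasons.all (· == "HEALTHY_CAMPAIGN_PROTECTED") then
      "ONLY_HEALTHY_DONORS_AVAILABLE"
    else
      let non_healthy := reasons.filter (fun r => r != "HEALTHY_CAMPAIGN_PROTECTED")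
      if !non_healthy.isEmpty && non_healthy.all (· == "PAIR_INVALID") then
        "ALL_DONORS_PAIR_INVALID"
      else if !non_healthy.isEmpty && non_healthy.all (· == "DUPLICATE_ORDER") then
        "ALL_DONORS_DUPLICATE_RISK"
      else if !non_healthy.isEmpty && non_healthy.all
          (fun r => PySem.Set.contains (PySem.Set.ofList ["NO_TON_GAIN", "NO_BAND_OR_GAP_PROGRESS"]) r) then
        "ALL_DONORS_NO_TON_GAIN"
      else if !non_healthy.isEmpty && non_healthy.all
          (fun r => PySem.Set.contains (PySem.Set.ofList ["DONOR_BAND_NOT_ALLOWED", "EMPTY_DONOR_ROWS"]) r) then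
        "SECOND_RECEIVER_NOT_WORTH_PROMOTING"
      else "NO_LOCAL_DONOR"

-- ===== PORT B =====
-- the module-level _CAT lookup table of Source B
def pvCatDict : PySem.Dict String String :=
  PySem.Dict.mk [("PAIR_INVALID", "ALL_DONORS_PAIR_INVALID"),
    ("DUPLICATE_ORDER", "ALL_DONORS_DUPLICATE_RISK"),
    ("NO_TON_GAIN", "ALL_DONORS_NO_TON_GAIN"),
    ("NO_BAND_OR_GAP_PROGRESS", "ALL_DONORS_NO_TON_GAIN"),
    ("DONOR_BAND_NOT_ALLOWED", "SECOND_RECEIVER_NOT_WORTH_PROMOTING"),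
    ("EMPTY_DONOR_ROWS", "SECOND_RECEIVER_NOT_WORTH_PROMOTING")]

-- one iteration of Source B's loop body
def pvStep (acc : Option String) (c : List (String × String)) : Option String :=
  let r := PySem.Dict.getD (PySem.Dict.mk c) "rejection_reason" ""
  if r == "HEALTHY_CAMPAIGN_PROTECTED" then acc
  else
    let cat := PySem.Dict.getD pvCatDict r "NO_LOCAL_DONOR"
    match acc with
    | none => some cat
    | some v => if v == cat then some v else some "NO_LOCAL_DONOR"

def summarize_second_receiver_failure_py_alt (candidates : List (List (String × String))) : String :=
  if candidates.isEmpty then "NO_LOCAL_DONOR"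
  else
    match candidates.foldl pvStep none with
    | none => "ONLY_HEALTHY_DONORS_AVAILABLE"
    | some v => v

-- ===== PRECONDITION & SPEC =====
def Spec_summarize_second_receiver_failure_py (candidates : List (List (String × String))) (out : String) : Prop := out = summarize_second_receiver_failure_py_alt candidates
instance (candidates : List (List (String × String))) (out : String) : Decidable (Spec_summarize_second_receiver_failure_py candidates out) := by unfold Spec_summarize_second_receiver_failure_py; infer_instance

-- ===== CLAIM (what is proved, stated in full; the proofs are below) =====
def Claim_equal_summarize_second_receiver_failure_py : Prop := ∀ (candidates : List (List (String × String))), Dom_summarize_second_receiver_failure_py candidates → Spec_summarize_second_receiver_failure_py candidates (summarize_second_receiver_failure_py candidates)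

-- ===== LEMMAS AND PROOFS =====

-- the category Source B assigns to a reason string, as a function of the reason
def pvCat (r : String) : String := PySem.Dict.getD pvCatDict r "NO_LOCAL_DONOR"

-- pvStep restricted to a non-healthy reason: merge its category into the accumulator
def pvMerge (acc : Option String) (r : String) : Option String :=
  match acc with
  | none => some (pvCat r)
  | some v => if v == pvCat r then some v else some "NO_LOCAL_DONOR"

theorem pvCat_eval (r : String) :
    pvCat r =
      if r = "PAIR_INVALID" then "ALL_DONORS_PAIR_INVALID"
      else if r = "DUPLICATE_ORDER" then "ALL_DONORS_DUPLICATE_RISK"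
      else if r = "NO_TON_GAIN" then "ALL_DONORS_NO_TON_GAIN"
      else if r = "NO_BAND_OR_GAP_PROGRESS" then "ALL_DONORS_NO_TON_GAIN"
      else if r = "DONOR_BAND_NOT_ALLOWED" then "SECOND_RECEIVER_NOT_WORTH_PROMOTING"
      else if r = "EMPTY_DONOR_ROWS" then "SECOND_RECEIVER_NOT_WORTH_PROMOTING"
      else "NO_LOCAL_DONOR" := by
  by_cases h1 : r = "PAIR_INVALID"
  · subst h1; rfl
  by_cases h2 : r = "DUPLICATE_ORDER"
  · subst h2; rfl
  by_cases h3 : r = "NO_TON_GAIN"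
  · subst h3; rfl
  by_cases h4 : r = "NO_BAND_OR_GAP_PROGRESS"
  · subst h4; rfl
  by_cases h5 : r = "DONOR_BAND_NOT_ALLOWED"
  · subst h5; rfl
  by_cases h6 : r = "EMPTY_DONOR_ROWS"
  · subst h6; rfl
  simp [pvCat, pvCatDict, PySem.Dict.getD_eq_get?_getD, PySem.Dict.get?_mk_cons, PySem.Dict.get?, h1, h2, h3, h4, h5, h6, Ne.symm h1, Ne.symm h2, Ne.symm h3, Ne.symm h4,
    Ne.symm h5, Ne.symm h6]

-- the fold over candidates is the merge-fold over the non-healthy reasons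
theorem pv_step_eq (cs : List (List (String × String))) (acc : Option String) :
    cs.foldl pvStep acc
      = ((cs.map (fun c => PySem.Dict.getD (PySem.Dict.mk c) "rejection_reason" "")).filter
          (fun r => r != "HEALTHY_CAMPAIGN_PROTECTED")).foldl pvMerge acc := by
  induction cs generalizing acc with
  | nil => rfl
  | cons c cs ih =>
    rw [List.foldl_cons, List.map_cons, List.filter_cons]
    by_cases h : PySem.Dict.getD (PySem.Dict.mk c) "rejection_reason" "" = "HEALTHY_CAMPAIGN_PROTECTED"
    · rw [show pvStep acc c = acc from by simp [pvStep, h]]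
      rw [if_neg (by simp [h])]
      exact ih acc
    · rw [show pvStep acc c = pvMerge acc (PySem.Dict.getD (PySem.Dict.mk c) "rejection_reason" "")
        from by cases acc <;> simp [pvStep, pvMerge, pvCat, h]]
      rw [if_pos (by simp [h]), List.foldl_cons]
      exact ih _

-- characterization of the merge-fold from a non-none accumulator
theorem pv_merge_char (t : List String) (a : String) :
    t.foldl pvMerge (some a)
      = some (if t.all (fun r => pvCat r == a) then a else "NO_LOCAL_DONOR") := by
  induction t generalizing a with
  | nil => simp
  | cons b t ih =>
    rw [List.foldl_cons]
    by_cases hb : a = pvCat b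
    · rw [show pvMerge (some a) b = some a from by simp [pvMerge, hb]]
      rw [ih, List.all_cons, show (pvCat b == a) = true from by simp [hb], Bool.true_and]
    · rw [show pvMerge (some a) b = some "NO_LOCAL_DONOR" from by simp [pvMerge, hb]]
      rw [ih, List.all_cons, show (pvCat b == a) = false from by rw [beq_eq_false_iff_ne]; exact fun h => hb h.symm,
        Bool.false_and]
      simp

-- the lambda forms of the four A-branch predicates, through pvCat
theorem pv_fun_pair : (fun r => pvCat r == "ALL_DONORS_PAIR_INVALID")
    = (fun r : String => r == "PAIR_INVALID") := by
  funext r; rw [pvCat_eval]; split_ifs <;> simp_all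
theorem pv_fun_dup : (fun r => pvCat r == "ALL_DONORS_DUPLICATE_RISK")
    = (fun r : String => r == "DUPLICATE_ORDER") := by
  funext r; rw [pvCat_eval]; split_ifs <;> simp_all
theorem pv_fun_ntg : (fun r => pvCat r == "ALL_DONORS_NO_TON_GAIN")
    = (fun r : String => PySem.Set.contains (PySem.Set.ofList ["NO_TON_GAIN", "NO_BAND_OR_GAP_PROGRESS"]) r) := by
  funext r; rw [pvCat_eval, PySem.Set.contains_eq_listContains]
  split_ifs <;> simp_all [PySem.Set.ofList]
theorem pv_fun_nwp : (fun r => pvCat r == "SECOND_RECEIVER_NOT_WORTH_PROMOTING")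
    = (fun r : String => PySem.Set.contains (PySem.Set.ofList ["DONOR_BAND_NOT_ALLOWED", "EMPTY_DONOR_ROWS"]) r) := by
  funext r; rw [pvCat_eval, PySem.Set.contains_eq_listContains]
  split_ifs <;> simp_all [PySem.Set.ofList]

-- A's branch chain on a non-empty non-healthy list equals B's merged verdict
theorem pv_chain_eq (x : String) (t : List String) :
    (if (x :: t).all (· == "PAIR_INVALID") then "ALL_DONORS_PAIR_INVALID"
     else if (x :: t).all (· == "DUPLICATE_ORDER") then "ALL_DONORS_DUPLICATE_RISK"
     else if (x :: t).all (fun r => PySem.Set.contains (PySem.Set.ofList ["NO_TON_GAIN", "NO_BAND_OR_GAP_PROGRESS"]) r) then "ALL_DONORS_NO_TON_GAIN"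
     else if (x :: t).all (fun r => PySem.Set.contains (PySem.Set.ofList ["DONOR_BAND_NOT_ALLOWED", "EMPTY_DONOR_ROWS"]) r) then "SECOND_RECEIVER_NOT_WORTH_PROMOTING"
     else "NO_LOCAL_DONOR")
    = (if t.all (fun r => pvCat r == pvCat x) then pvCat x else "NO_LOCAL_DONOR") := by
  by_cases h1 : x = "PAIR_INVALID"
  · subst h1
    rw [show pvCat "PAIR_INVALID" = "ALL_DONORS_PAIR_INVALID" from rfl, pv_fun_pair]
    by_cases ht : t.all (fun r : String => r == "PAIR_INVALID") <;> simp [ht]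
  by_cases h2 : x = "DUPLICATE_ORDER"
  · subst h2
    rw [show pvCat "DUPLICATE_ORDER" = "ALL_DONORS_DUPLICATE_RISK" from rfl, pv_fun_dup]
    by_cases ht : t.all (fun r : String => r == "DUPLICATE_ORDER") <;> simp [ht]
  by_cases h34 : x = "NO_TON_GAIN" ∨ x = "NO_BAND_OR_GAP_PROGRESS"
  · have hc : pvCat x = "ALL_DONORS_NO_TON_GAIN" := by
      rcases h34 with h | h <;> subst h <;> rfl
    rw [hc, pv_fun_ntg]
    by_cases ht : t.all (fun r : String =>
        PySem.Set.contains (PySem.Set.ofList ["NO_TON_GAIN", "NO_BAND_OR_GAP_PROGRESS"]) r) <;>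
      rcases h34 with h | h <;> subst h <;> simp [ht, h1, h2, PySem.Set.contains_eq_listContains]
  by_cases h56 : x = "DONOR_BAND_NOT_ALLOWED" ∨ x = "EMPTY_DONOR_ROWS"
  · have hc : pvCat x = "SECOND_RECEIVER_NOT_WORTH_PROMOTING" := by
      rcases h56 with h | h <;> subst h <;> rfl
    rw [hc, pv_fun_nwp]
    by_cases ht : t.all (fun r : String =>
        PySem.Set.contains (PySem.Set.ofList ["DONOR_BAND_NOT_ALLOWED", "EMPTY_DONOR_ROWS"]) r) <;>
      rcases h56 with h | h <;> subst h <;>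
        simp [ht, h1, h2, h34, PySem.Set.contains_eq_listContains]
  -- x is none of the recognized reasons: every A branch fails at the head, and pvCat x = NLD
  push_neg at h34 h56
  have hc : pvCat x = "NO_LOCAL_DONOR" := by
    rw [pvCat_eval]
    simp [h1, h2, h34.1, h34.2, h56.1, h56.2]
  rw [hc, ite_self]
  simp [List.all_cons, h1, h2, h34.1, h34.2, h56.1, h56.2, PySem.Set.contains_eq_listContains]

-- ===== VERDICT (by name: the statement is the Claim_ definition above) =====
theorem summarize_second_receiver_failure_py_spec : Claim_equal_summarize_second_receiver_failure_py := by
  intro candidates _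
  unfold Spec_summarize_second_receiver_failure_py
  unfold summarize_second_receiver_failure_py summarize_second_receiver_failure_py_alt
  cases candidates with
  | nil => rfl
  | cons c cs =>
    rw [pv_step_eq]
    simp only [List.isEmpty_cons, Bool.false_eq_true, if_false]
    set rs := (c :: cs).map (fun c => PySem.Dict.getD (PySem.Dict.mk c) "rejection_reason" "") with hrs
    have hne : rs.isEmpty = false := by simp [hrs]
    cases hnh : rs.filter (fun r => r != "HEALTHY_CAMPAIGN_PROTECTED") with
    | nil =>
      -- all reasons healthy: A takes its first branch, B's fold stays none
      have hall : rs.all (· == "HEALTHY_CAMPAIGN_PROTECTED") = true := by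
        rw [List.all_eq_true]; intro r hr
        by_contra h
        have : r ∈ rs.filter (fun x => x != "HEALTHY_CAMPAIGN_PROTECTED") :=
          List.mem_filter.mpr ⟨hr, by simpa using h⟩
        simp [hnh] at this
      simp [hall, hne]
    | cons x t =>
      -- some non-healthy reason: A's first branch fails, the chain matches the merged verdict
      have hx := List.mem_filter.mp (hnh ▸ List.mem_cons_self)
      have hall : rs.all (· == "HEALTHY_CAMPAIGN_PROTECTED") = false := by
        rw [List.all_eq_false]
        exact ⟨x, hx.1, by simpa using hx.2⟩
      rw [List.foldl_cons,
        show pvMerge none x = some (pvCat x) from rfl, pv_merge_char]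
      simp only [hall, hne, Bool.not_false, Bool.true_and, Bool.and_false, Bool.false_and,
        Bool.false_eq_true, if_false, List.isEmpty_cons]
      exact pv_chain_eq x t
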